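-- pv_equiv track=rewrite | github.com/zmwangx/Project-Euler | 225/solution.py | search_multiple
-- ===== SOURCE A (Python) =====
-- def search_multiple(n):
--     t = (1, 1, 1)
--     seen = set([t])
--     steps = 0
--     while True:
--         steps += 1
--         new = (t[0] + t[1] + t[2]) % n
--         if new == 0:
--             return True
--         t = (t[1], t[2], new)
--         if t in seen:
--             return False
--         seen.add(t)
-- ===== SOURCE B (Python) =====
-- def search_multiple(n):
--     # Cycle detection via a fixed anchor instead of a growing seen-set:
--     # after three steps every state component is a reduced residue mod n, so
--     # the state reached after step 3 lies on the cycle and must recur; we loop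
--     # until it does, checking each produced residue for zero along the way.
--     a, b, c = 1, 1, 1
--     for _ in range(3):
--         a, b, c = b, c, (a + b + c) % n
--         if c == 0:
--             return True
--     anchor = (a, b, c)
--     while True:
--         a, b, c = b, c, (a + b + c) % n
--         if c == 0:
--             return True
--         if (a, b, c) == anchor:
--             return False
-- ===== Notes on version B (the rewrite author's own statement) =====
-- stated objective: alternative
-- what changed: The growing seen-set is replaced by O(1)-memory cycle detection against a fixed anchor: after three warm-up steps every state component is a reduced residue mod n, so that state lies on the orbit's cycle and must recur; B loops until the anchor recurs, checking each produced residue for zero.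
-- outside the precondition, e.g. on search_multiple(0): A raises ZeroDivisionError, B raises ZeroDivisionError
import Mathlib
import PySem

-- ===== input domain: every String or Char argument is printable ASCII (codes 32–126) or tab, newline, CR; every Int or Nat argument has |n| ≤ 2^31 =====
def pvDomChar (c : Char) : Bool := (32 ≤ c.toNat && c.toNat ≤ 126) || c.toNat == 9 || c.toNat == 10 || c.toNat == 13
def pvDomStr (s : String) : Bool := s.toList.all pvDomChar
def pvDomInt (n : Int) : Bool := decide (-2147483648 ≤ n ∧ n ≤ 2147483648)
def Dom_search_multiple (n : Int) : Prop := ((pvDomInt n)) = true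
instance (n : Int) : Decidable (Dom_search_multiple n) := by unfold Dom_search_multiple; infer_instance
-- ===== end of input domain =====

-- B replaces A's growing seen-set by a fixed anchor: after three steps the state is made of
-- reduced residues and must recur, so B loops until the anchor state recurs (O(1) memory).
-- Both loops are written with a fuel counter that is provably never exhausted for n ≠ 0.

-- fuel bound shared by both loop guards: a repeat/recurrence happens within |n|^3 + 10 steps
def pvFuel (n : Int) : Nat := n.natAbs ^ 3 + 10

-- ===== PORT A =====
-- `seen` is A's internal set (never returned, iteration order never consumed);
-- it is ported as Std.HashSet — membership-exact for Python's `in`/`add` — so the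
-- evaluator's membership test is O(1) as in Python.
def loopA (n : Int) : Nat → Int × Int × Int → Std.HashSet (Int × Int × Int) → Bool
  | 0, _, _ => false
  | fuel + 1, t, seen =>
    let new := PySem.Int.mod (t.1 + t.2.1 + t.2.2) n
    if new = 0 then true
    else
      let t' := (t.2.1, t.2.2, new)
      if seen.contains t' then false
      else loopA n fuel t' (seen.insert t')

def search_multiple (n : Int) : Bool :=
  loopA n (pvFuel n) (1, 1, 1) (Std.HashSet.ofList [(1, 1, 1)])

-- ===== PORT B =====
def stepB (n : Int) (t : Int × Int × Int) : Int × Int × Int :=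
  (t.2.1, t.2.2, PySem.Int.mod (t.1 + t.2.1 + t.2.2) n)

-- the `for _ in range(3)` warm-up; `none` encodes the early `return True`
def phaseB (n : Int) : Nat → Int × Int × Int → Option (Int × Int × Int)
  | 0, t => some t
  | k + 1, t =>
    let t' := stepB n t
    if t'.2.2 = 0 then none
    else phaseB n k t'

def loopB (n : Int) : Nat → Int × Int × Int → Int × Int × Int → Bool
  | 0, _, _ => false
  | fuel + 1, t, anchor =>
    let t' := stepB n t
    if t'.2.2 = 0 then true
    else if t' = anchor then false
    else loopB n fuel t' anchor

def search_multiple_alt (n : Int) : Bool :=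
  match phaseB n 3 (1, 1, 1) with
  | none => true
  | some t => loopB n (pvFuel n) t t

-- ===== PRECONDITION & SPEC =====
-- A raises ZeroDivisionError at n = 0; Pre_ excludes exactly that input.
def Pre_search_multiple (n : Int) : Prop := n ≠ 0
instance (n : Int) : Decidable (Pre_search_multiple n) := by unfold Pre_search_multiple; infer_instance
def pvWitness_search_multiple : Int := 7

def Spec_search_multiple (n : Int) (out : Bool) : Prop := out = search_multiple_alt n
instance (n : Int) (out : Bool) : Decidable (Spec_search_multiple n out) := by unfold Spec_search_multiple; infer_instance

-- ===== CLAIM (what is proved, stated in full; the proofs are below) =====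
def Claim_equal_search_multiple : Prop := ∀ (n : Int), Dom_search_multiple n → Pre_search_multiple n → Spec_search_multiple n (search_multiple n)

-- ===== LEMMAS AND PROOFS =====

-- the mathematical orbit both loops walk: pvSeq n k is the state after k steps
def pvSeq (n : Int) : Nat → Int × Int × Int
  | 0 => (1, 1, 1)
  | k + 1 => stepB n (pvSeq n k)

lemma pvSeq_succ (n : Int) (k : Nat) : pvSeq n (k + 1) = stepB n (pvSeq n k) := rfl

-- x is a reduced residue mod n (a possible output of Python's %)
def IsRed (n x : Int) : Prop := if 0 < n then 0 ≤ x ∧ x < n else n < x ∧ x ≤ 0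

def RedT (n : Int) (t : Int × Int × Int) : Prop := IsRed n t.1 ∧ IsRed n t.2.1 ∧ IsRed n t.2.2

lemma mod_isRed (n x : Int) (hn : n ≠ 0) : IsRed n (PySem.Int.mod x n) := by
  unfold IsRed
  split_ifs with h
  · exact ⟨PySem.Int.mod_nonneg x h, PySem.Int.mod_lt x h⟩
  · exact PySem.Int.mod_neg_bounds x (by omega)

lemma redT_seq (n : Int) (hn : n ≠ 0) (k : Nat) (hk : 3 ≤ k) : RedT n (pvSeq n k) := by
  obtain ⟨j, rfl⟩ : ∃ j, k = j + 3 := ⟨k - 3, by omega⟩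
  show RedT n (stepB n (stepB n (stepB n (pvSeq n j))))
  exact ⟨mod_isRed n _ hn, mod_isRed n _ hn, mod_isRed n _ hn⟩

lemma mod_congr_dvd (n x y : Int) (h : PySem.Int.mod x n = PySem.Int.mod y n) : n ∣ (x - y) := by
  have hx := PySem.Int.floordiv_mul_add_mod x n
  have hy := PySem.Int.floordiv_mul_add_mod y n
  refine ⟨PySem.Int.floordiv x n - PySem.Int.floordiv y n, ?_⟩
  linear_combination hy - hx + h

lemma isRed_inj (n x y : Int) (hn : n ≠ 0) (hx : IsRed n x) (hy : IsRed n y)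
    (hd : n ∣ (x - y)) : x = y := by
  unfold IsRed at hx hy
  rcases lt_or_gt_of_ne hn with hneg | hpos
  · rw [if_neg (by omega)] at hx hy
    have := Int.eq_zero_of_abs_lt_dvd ((neg_dvd).mpr hd) (by rw [abs_lt]; omega)
    omega
  · rw [if_pos hpos] at hx hy
    have := Int.eq_zero_of_abs_lt_dvd hd (by rw [abs_lt]; omega)
    omega

lemma stepB_inj (n : Int) (t u : Int × Int × Int) (hn : n ≠ 0) (ht : RedT n t) (hu : RedT n u)
    (h : stepB n t = stepB n u) : t = u := by
  obtain ⟨a, b, c⟩ := t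
  obtain ⟨a', b', c'⟩ := u
  simp only [stepB, Prod.mk.injEq] at h
  obtain ⟨hb, hc, hm⟩ := h
  subst hb; subst hc
  have hd : n ∣ (a - a') := by
    have := mod_congr_dvd n (a + b + c) (a' + b + c) hm
    have heq : (a + b + c) - (a' + b + c) = a - a' := by ring
    rwa [heq] at this
  have := isRed_inj n a a' hn ht.1 hu.1 hd
  simp [this]

lemma per_up (n : Int) (j q : Nat) (h : pvSeq n j = pvSeq n (j + q)) :
    ∀ m, j ≤ m → pvSeq n m = pvSeq n (m + q) := by
  intro m hm
  induction m, hm using Nat.le_induction with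
  | base => exact h
  | succ m hm ih =>
    have : m + 1 + q = (m + q) + 1 := by omega
    rw [this, pvSeq_succ, pvSeq_succ, ih]

lemma per_down (n : Int) (q : Nat) (hn : n ≠ 0) :
    ∀ d, pvSeq n (3 + d) = pvSeq n (3 + d + q) → pvSeq n 3 = pvSeq n (3 + q) := by
  intro d
  induction d with
  | zero => exact fun h => h
  | succ d ih =>
    intro h
    apply ih
    rw [show 3 + (d + 1) + q = (3 + d + q) + 1 from by omega] at h
    rw [show 3 + (d + 1) = (3 + d) + 1 from rfl, pvSeq_succ, pvSeq_succ] at h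
    exact stepB_inj n _ _ hn (redT_seq n hn _ (by omega)) (redT_seq n hn _ (by omega)) h

noncomputable def resFinset (n : Int) : Finset Int := if (0:Int) < n then Finset.Ico 0 n else Finset.Ico (n + 1) 1

lemma card_resFinset (n : Int) : (resFinset n).card = n.natAbs := by
  unfold resFinset
  split_ifs with h
  · rw [Int.card_Ico]; omega
  · rw [Int.card_Ico]; omega

lemma mem_resFinset (n x : Int) : x ∈ resFinset n ↔ IsRed n x := by
  unfold resFinset IsRed
  split_ifs with h
  · rw [Finset.mem_Ico]
  · rw [Finset.mem_Ico]; omega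

lemma exists_repeat (n : Int) (hn : n ≠ 0) :
    ∃ a b, 3 ≤ a ∧ a < b ∧ b ≤ 3 + n.natAbs ^ 3 ∧ pvSeq n a = pvSeq n b := by
  classical
  set N := n.natAbs ^ 3 with hN
  have hcard : ((resFinset n) ×ˢ (resFinset n) ×ˢ (resFinset n)).card < (Finset.range (N + 1)).card := by
    rw [Finset.card_product, Finset.card_product, Finset.card_range,
      card_resFinset n]
    have h3 : n.natAbs * (n.natAbs * n.natAbs) = n.natAbs ^ 3 := by ring
    omega
  have hmaps : Set.MapsTo (fun k => pvSeq n (k + 3)) ((Finset.range (N + 1) : Finset Nat) : Set Nat)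
      ((((resFinset n) ×ˢ (resFinset n) ×ˢ (resFinset n) : Finset (Int × Int × Int))) : Set (Int × Int × Int)) := by
    intro k _
    have hr := redT_seq n hn (k + 3) (by omega)
    simp only [Finset.mem_coe, Finset.mem_product, mem_resFinset]
    exact ⟨hr.1, hr.2.1, hr.2.2⟩
  obtain ⟨x, hx, y, hy, hxy, hfeq⟩ := Finset.exists_ne_map_eq_of_card_lt_of_maps_to hcard hmaps
  simp only [Finset.mem_range] at hx hy
  rcases Nat.lt_or_ge x y with hlt | hge
  · exact ⟨x + 3, y + 3, by omega, by omega, by omega, hfeq⟩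
  · have : y < x := by omega
    exact ⟨y + 3, x + 3, by omega, by omega, by omega, hfeq.symm⟩

-- a repeat before the first zero would push a zero below the minimum: impossible
lemma no_repeat_of_min_zero (n : Int) (k0 : Nat) (hz : (pvSeq n k0).2.2 = 0)
    (hmin : ∀ m, 1 ≤ m → m < k0 → (pvSeq n m).2.2 ≠ 0) :
    ∀ j i, j < i → i < k0 → pvSeq n j ≠ pvSeq n i := by
  intro j i hji hik heq
  have hper := per_up n j (i - j) (by rwa [Nat.add_sub_cancel' (by omega : j ≤ i)])
  have hkj : j ≤ k0 - (i - j) := by omega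
  have := hper (k0 - (i - j)) hkj
  rw [Nat.sub_add_cancel (by omega)] at this
  exact hmin (k0 - (i - j)) (by omega) (by omega) (by rw [this]; exact hz)

lemma k0_le (n : Int) (k0 : Nat) (hn : n ≠ 0) (hz : (pvSeq n k0).2.2 = 0)
    (hmin : ∀ m, 1 ≤ m → m < k0 → (pvSeq n m).2.2 ≠ 0) : k0 ≤ 3 + n.natAbs ^ 3 := by
  obtain ⟨a, b, hab3, hab, hble, heq⟩ := exists_repeat n hn
  by_contra h
  exact no_repeat_of_min_zero n k0 hz hmin a b hab (by omega) heq

lemma loopA_true (n : Int) (k0 : Nat) (hz : (pvSeq n k0).2.2 = 0)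
    (hmin : ∀ m, 1 ≤ m → m < k0 → (pvSeq n m).2.2 ≠ 0) :
    ∀ d i (seen : Std.HashSet (Int × Int × Int)), i < k0 → k0 ≤ i + d →
      (∀ s, s ∈ seen ↔ ∃ j, j ≤ i ∧ pvSeq n j = s) →
      loopA n d (pvSeq n i) seen = true := by
  intro d
  induction d with
  | zero => intro i seen hik hk0 _; exfalso; omega
  | succ d ih =>
    intro i seen hik hk0 hinv
    have hstep : ((pvSeq n i).2.1, (pvSeq n i).2.2,
        PySem.Int.mod ((pvSeq n i).1 + (pvSeq n i).2.1 + (pvSeq n i).2.2) n) = pvSeq n (i + 1) := rfl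
    have hnew : (pvSeq n (i + 1)).2.2
        = PySem.Int.mod ((pvSeq n i).1 + (pvSeq n i).2.1 + (pvSeq n i).2.2) n := rfl
    simp only [loopA]
    by_cases hz1 : PySem.Int.mod ((pvSeq n i).1 + (pvSeq n i).2.1 + (pvSeq n i).2.2) n = 0
    · rw [if_pos hz1]
    · rw [if_neg hz1]
      have hlt : i + 1 < k0 := by
        rcases Nat.lt_or_ge (i + 1) k0 with h | h
        · exact h
        · exfalso
          apply hz1
          have he : i + 1 = k0 := by omega
          rw [← hnew, he, hz]
      have hmem : pvSeq n (i + 1) ∉ seen := by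
        intro hm
        obtain ⟨j, hj, hje⟩ := (hinv _).mp hm
        exact no_repeat_of_min_zero n k0 hz hmin j (i + 1) (by omega) hlt hje
      rw [hstep]
      rw [if_neg (by rw [Std.HashSet.contains_iff_mem]; exact hmem)]
      apply ih (i + 1) (seen.insert (pvSeq n (i + 1))) hlt (by omega)
      intro s
      rw [Std.HashSet.mem_insert, beq_iff_eq]
      constructor
      · rintro (rfl | hs)
        · exact ⟨i + 1, le_refl _, rfl⟩
        · obtain ⟨j, hj, hje⟩ := (hinv s).mp hs
          exact ⟨j, by omega, hje⟩
      · rintro ⟨j, hj, rfl⟩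
        rcases Nat.lt_or_ge j (i + 1) with h | h
        · exact Or.inr ((hinv _).mpr ⟨j, by omega, rfl⟩)
        · have : j = i + 1 := by omega
          subst this
          exact Or.inl rfl

lemma loopB_true (n : Int) (k0 : Nat) (hz : (pvSeq n k0).2.2 = 0)
    (hmin : ∀ m, 1 ≤ m → m < k0 → (pvSeq n m).2.2 ≠ 0) :
    ∀ d i, 3 + i < k0 → k0 ≤ 3 + i + d →
      loopB n d (pvSeq n (3 + i)) (pvSeq n 3) = true := by
  intro d
  induction d with
  | zero => intro i h1 h2; exfalso; omega
  | succ d ih =>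
    intro i h1 h2
    have hstep : stepB n (pvSeq n (3 + i)) = pvSeq n (3 + i + 1) := rfl
    simp only [loopB]
    by_cases hz1 : (stepB n (pvSeq n (3 + i))).2.2 = 0
    · rw [if_pos hz1]
    · rw [if_neg hz1]
      have hlt : 3 + i + 1 < k0 := by
        rcases Nat.lt_or_ge (3 + i + 1) k0 with h | h
        · exact h
        · exfalso
          apply hz1
          rw [hstep]
          have he : 3 + i + 1 = k0 := by omega
          rw [he, hz]
      have hne : stepB n (pvSeq n (3 + i)) ≠ pvSeq n 3 := by
        rw [hstep]
        intro he
        exact no_repeat_of_min_zero n k0 hz hmin 3 (3 + i + 1) (by omega) hlt he.symm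
      rw [if_neg hne, hstep, show 3 + i + 1 = 3 + (i + 1) from by omega]
      exact ih (i + 1) (by omega) (by omega)

lemma loopA_false (n : Int) (R : Nat) (hnz : ∀ m, 1 ≤ m → (pvSeq n m).2.2 ≠ 0)
    (hR : ∃ j, j < R ∧ pvSeq n j = pvSeq n R)
    (hmin : ∀ i, i < R → ¬ ∃ j, j < i ∧ pvSeq n j = pvSeq n i) :
    ∀ d i (seen : Std.HashSet (Int × Int × Int)), i < R → R ≤ i + d →
      (∀ s, s ∈ seen ↔ ∃ j, j ≤ i ∧ pvSeq n j = s) →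
      loopA n d (pvSeq n i) seen = false := by
  intro d
  induction d with
  | zero => intro i seen hik hk0 _; exfalso; omega
  | succ d ih =>
    intro i seen hik hR0 hinv
    have hstep : ((pvSeq n i).2.1, (pvSeq n i).2.2,
        PySem.Int.mod ((pvSeq n i).1 + (pvSeq n i).2.1 + (pvSeq n i).2.2) n) = pvSeq n (i + 1) := rfl
    have hnew : (pvSeq n (i + 1)).2.2
        = PySem.Int.mod ((pvSeq n i).1 + (pvSeq n i).2.1 + (pvSeq n i).2.2) n := rfl
    simp only [loopA]
    rw [if_neg (by rw [← hnew]; exact hnz (i + 1) (by omega)), hstep]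
    rcases Nat.lt_or_ge (i + 1) R with hlt | hge
    · have hmem : pvSeq n (i + 1) ∉ seen := by
        intro hm
        obtain ⟨j, hj, hje⟩ := (hinv _).mp hm
        exact hmin (i + 1) hlt ⟨j, by omega, hje⟩
      rw [if_neg (by rw [Std.HashSet.contains_iff_mem]; exact hmem)]
      apply ih (i + 1) (seen.insert (pvSeq n (i + 1))) hlt (by omega)
      intro s
      rw [Std.HashSet.mem_insert, beq_iff_eq]
      constructor
      · rintro (rfl | hs)
        · exact ⟨i + 1, le_refl _, rfl⟩
        · obtain ⟨j, hj, hje⟩ := (hinv s).mp hs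
          exact ⟨j, by omega, hje⟩
      · rintro ⟨j, hj, rfl⟩
        rcases Nat.lt_or_ge j (i + 1) with h | h
        · exact Or.inr ((hinv _).mpr ⟨j, by omega, rfl⟩)
        · have : j = i + 1 := by omega
          subst this
          exact Or.inl rfl
    · have heqR : i + 1 = R := by omega
      obtain ⟨j, hj, hje⟩ := hR
      have hmem : pvSeq n (i + 1) ∈ seen := (hinv _).mpr ⟨j, by omega, by rw [hje, heqR]⟩
      rw [if_pos (by rw [Std.HashSet.contains_iff_mem]; exact hmem)]

lemma loopB_false (n : Int) (p : Nat) (hnz : ∀ m, 1 ≤ m → (pvSeq n m).2.2 ≠ 0)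
    (hp : pvSeq n (3 + p) = pvSeq n 3)
    (hmin : ∀ q, 1 ≤ q → q < p → pvSeq n (3 + q) ≠ pvSeq n 3) :
    ∀ d i, i < p → p ≤ i + d →
      loopB n d (pvSeq n (3 + i)) (pvSeq n 3) = false := by
  intro d
  induction d with
  | zero => intro i h1 h2; exfalso; omega
  | succ d ih =>
    intro i h1 h2
    have hstep : stepB n (pvSeq n (3 + i)) = pvSeq n (3 + i + 1) := rfl
    simp only [loopB]
    rw [if_neg (by rw [hstep]; exact hnz (3 + i + 1) (by omega))]
    rcases Nat.lt_or_ge (i + 1) p with hlt | hge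
    · have hne : stepB n (pvSeq n (3 + i)) ≠ pvSeq n 3 := by
        rw [hstep, show 3 + i + 1 = 3 + (i + 1) from by omega]
        exact hmin (i + 1) (by omega) hlt
      rw [if_neg hne, hstep, show 3 + i + 1 = 3 + (i + 1) from by omega]
      exact ih (i + 1) hlt (by omega)
    · have heqp : i + 1 = p := by omega
      have he : stepB n (pvSeq n (3 + i)) = pvSeq n 3 := by
        rw [hstep, show 3 + i + 1 = 3 + (i + 1) from by omega, heqp, hp]
      rw [if_pos he]

lemma phaseB_some (n : Int) (hnz3 : ∀ m, 1 ≤ m → m ≤ 3 → (pvSeq n m).2.2 ≠ 0) :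
    phaseB n 3 (1, 1, 1) = some (pvSeq n 3) := by
  have e3 : phaseB n 3 (1, 1, 1)
      = if (pvSeq n 1).2.2 = 0 then none else phaseB n 2 (pvSeq n 1) := rfl
  have e2 : phaseB n 2 (pvSeq n 1)
      = if (pvSeq n 2).2.2 = 0 then none else phaseB n 1 (pvSeq n 2) := rfl
  have e1 : phaseB n 1 (pvSeq n 2)
      = if (pvSeq n 3).2.2 = 0 then none else phaseB n 0 (pvSeq n 3) := rfl
  rw [e3, if_neg (hnz3 1 (by omega) (by omega)), e2, if_neg (hnz3 2 (by omega) (by omega)),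
    e1, if_neg (hnz3 3 (by omega) (by omega))]
  rfl

lemma phaseB_none (n : Int) (k0 : Nat) (h1 : 1 ≤ k0) (h3 : k0 ≤ 3) (hz : (pvSeq n k0).2.2 = 0)
    (hmin : ∀ m, 1 ≤ m → m < k0 → (pvSeq n m).2.2 ≠ 0) :
    phaseB n 3 (1, 1, 1) = none := by
  have e3 : phaseB n 3 (1, 1, 1)
      = if (pvSeq n 1).2.2 = 0 then none else phaseB n 2 (pvSeq n 1) := rfl
  have e2 : phaseB n 2 (pvSeq n 1)
      = if (pvSeq n 2).2.2 = 0 then none else phaseB n 1 (pvSeq n 2) := rfl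
  have e1 : phaseB n 1 (pvSeq n 2)
      = if (pvSeq n 3).2.2 = 0 then none else phaseB n 0 (pvSeq n 3) := rfl
  interval_cases k0
  · rw [e3, if_pos hz]
  · rw [e3, if_neg (hmin 1 (by omega) (by omega)), e2, if_pos hz]
  · rw [e3, if_neg (hmin 1 (by omega) (by omega)), e2, if_neg (hmin 2 (by omega) (by omega)),
      e1, if_pos hz]

-- ===== VERDICT (by name: the statement is the Claim_ definition above) =====
lemma seen0_inv (n : Int) :
    ∀ s, s ∈ Std.HashSet.ofList [((1 : Int), (1 : Int), (1 : Int))] ↔ ∃ j, j ≤ 0 ∧ pvSeq n j = s := by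
  intro s
  rw [Std.HashSet.mem_ofList, List.contains_iff_mem]
  constructor
  · intro hs
    simp only [List.mem_singleton] at hs
    exact ⟨0, le_refl _, hs.symm⟩
  · rintro ⟨j, hj, rfl⟩
    have : j = 0 := by omega
    subst this
    simp [pvSeq]

theorem search_multiple_spec : Claim_equal_search_multiple := by
  intro n _ hn
  unfold Spec_search_multiple
  by_cases hex : ∃ k, 1 ≤ k ∧ (pvSeq n k).2.2 = 0
  · -- a zero occurs: both programs return true
    have h1 : 1 ≤ Nat.find hex := (Nat.find_spec hex).1
    have hz : (pvSeq n (Nat.find hex)).2.2 = 0 := (Nat.find_spec hex).2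
    have hmin : ∀ m, 1 ≤ m → m < Nat.find hex → (pvSeq n m).2.2 ≠ 0 :=
      fun m hm1 hm hzz => Nat.find_min hex hm ⟨hm1, hzz⟩
    have hb := k0_le n (Nat.find hex) hn hz hmin
    have hA : search_multiple n = true := by
      unfold search_multiple
      rw [show ((1 : Int), (1 : Int), (1 : Int)) = pvSeq n 0 from rfl]
      exact loopA_true n (Nat.find hex) hz hmin (pvFuel n) 0 _ (by omega)
        (by unfold pvFuel; omega) (seen0_inv n)
    have hB : search_multiple_alt n = true := by
      unfold search_multiple_alt
      by_cases h3 : Nat.find hex ≤ 3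
      · rw [phaseB_none n (Nat.find hex) h1 h3 hz hmin]
      · rw [phaseB_some n (fun m hm1 hm3 => hmin m hm1 (by omega))]
        exact loopB_true n (Nat.find hex) hz hmin (pvFuel n) 0 (by omega)
          (by unfold pvFuel; omega)
    rw [hA, hB]
  · -- no zero ever: both programs return false
    have hnz : ∀ m, 1 ≤ m → (pvSeq n m).2.2 ≠ 0 := fun m hm hzz => hex ⟨m, hm, hzz⟩
    obtain ⟨a, b, ha3, hab, hble, heq⟩ := exists_repeat n hn
    have hexR : ∃ i, ∃ j, j < i ∧ pvSeq n j = pvSeq n i := ⟨b, a, hab, heq⟩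
    have hRspec := Nat.find_spec hexR
    have hRmin : ∀ i, i < Nat.find hexR → ¬ ∃ j, j < i ∧ pvSeq n j = pvSeq n i :=
      fun i hi => Nat.find_min hexR hi
    have hRle : Nat.find hexR ≤ b := Nat.find_min' hexR ⟨a, hab, heq⟩
    have hR1 : 1 ≤ Nat.find hexR := by
      obtain ⟨j, hj, _⟩ := hRspec
      omega
    have hA : search_multiple n = false := by
      unfold search_multiple
      rw [show ((1 : Int), (1 : Int), (1 : Int)) = pvSeq n 0 from rfl]
      exact loopA_false n (Nat.find hexR) hnz hRspec hRmin (pvFuel n) 0 _ (by omega)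
        (by unfold pvFuel; omega) (seen0_inv n)
    have hq : pvSeq n 3 = pvSeq n (3 + (b - a)) := by
      apply per_down n (b - a) hn (a - 3)
      rw [show 3 + (a - 3) = a from by omega, show a + (b - a) = b from by omega]
      exact heq
    have hexp : ∃ q, 1 ≤ q ∧ pvSeq n (3 + q) = pvSeq n 3 := ⟨b - a, by omega, hq.symm⟩
    have hp1 : 1 ≤ Nat.find hexp := (Nat.find_spec hexp).1
    have hpe : pvSeq n (3 + Nat.find hexp) = pvSeq n 3 := (Nat.find_spec hexp).2
    have hpmin : ∀ q, 1 ≤ q → q < Nat.find hexp → pvSeq n (3 + q) ≠ pvSeq n 3 :=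
      fun q hq1 hq hqe => Nat.find_min hexp hq ⟨hq1, hqe⟩
    have hple : Nat.find hexp ≤ b - a := Nat.find_min' hexp ⟨by omega, hq.symm⟩
    have hB : search_multiple_alt n = false := by
      unfold search_multiple_alt
      rw [phaseB_some n (fun m hm1 _ => hnz m hm1)]
      exact loopB_false n (Nat.find hexp) hnz hpe hpmin (pvFuel n) 0 (by omega)
        (by unfold pvFuel; omega)
    rw [hA, hB]
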